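-- pv_equiv track=rewrite | github.com/zcappai/MSc-Computer-Science | Chequerboard 2D Array/main.py | empLine
-- ===== SOURCE A (Python) =====
-- def empLine(length, hashLength):
--     line = []
--     count = 0
--     hashCount = 0
--     spaceCount = 0
--     while(count <  length):
--         if(spaceCount < hashLength):
--             line += ' '
--             spaceCount += 1
--         elif(hashCount <  hashLength):
--             line += '#'
--             hashCount += 1
--         if(hashCount == hashLength):
--             hashCount = 0
--             spaceCount = 0
--         count += 1
--     return line
-- ===== SOURCE B (Python) =====
-- def empLine(length, hashLength):
--     if hashLength <= 0:
--         return []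
--     return [' ' if i % (2 * hashLength) < hashLength else '#' for i in range(length)]
-- ===== Notes on version B (the rewrite author's own statement) =====
-- stated objective: simpler
-- what changed: Replaces the stateful while-loop with three counters (count/hashCount/spaceCount with reset) by a closed-form comprehension computing each character from its index via modular arithmetic, guarded by hashLength <= 0 returning [] as A does.
import Mathlib
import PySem

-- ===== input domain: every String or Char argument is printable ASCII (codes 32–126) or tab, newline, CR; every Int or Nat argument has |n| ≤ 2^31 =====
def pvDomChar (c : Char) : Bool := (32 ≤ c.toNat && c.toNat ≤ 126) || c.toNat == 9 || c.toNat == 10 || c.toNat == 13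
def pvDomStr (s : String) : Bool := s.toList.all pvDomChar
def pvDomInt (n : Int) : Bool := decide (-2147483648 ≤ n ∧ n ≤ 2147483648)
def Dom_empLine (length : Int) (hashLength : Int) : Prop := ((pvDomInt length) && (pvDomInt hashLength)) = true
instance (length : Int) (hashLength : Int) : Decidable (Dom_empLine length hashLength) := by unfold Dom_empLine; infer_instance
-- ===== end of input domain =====

-- B replaces A's stateful counter/reset while-loop by a guarded closed-form per-index character (simpler).

-- ===== PORT A =====
-- A's while loop runs exactly length.toNat iterations (count += 1 unconditionally each pass);
-- loop state carried: hashCount, spaceCount, line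
def empALoop (hashLength : Int) : Nat → Int → Int → List String → List String
  | 0, _, _, line => line
  | n + 1, hashCount, spaceCount, line =>
    let st :=
      if spaceCount < hashLength then (line ++ [" "], hashCount, spaceCount + 1)
      else if hashCount < hashLength then (line ++ ["#"], hashCount + 1, spaceCount)
      else (line, hashCount, spaceCount)
    let st2 := if st.2.1 = hashLength then (st.1, (0 : Int), (0 : Int)) else st
    empALoop hashLength n st2.2.1 st2.2.2 st2.1

def empLine (length : Int) (hashLength : Int) : List String :=
  empALoop hashLength length.toNat 0 0 []

-- ===== PORT B =====
def empLine_alt (length : Int) (hashLength : Int) : List String :=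
  if hashLength ≤ 0 then []
  else (PySem.List.pyRange 0 length 1).map
    (fun i => if PySem.Int.mod i (2 * hashLength) < hashLength then " " else "#")

-- ===== PRECONDITION & SPEC =====
def Spec_empLine (length : Int) (hashLength : Int) (out : List String) : Prop := out = empLine_alt length hashLength
instance (length : Int) (hashLength : Int) (out : List String) : Decidable (Spec_empLine length hashLength out) := by unfold Spec_empLine; infer_instance

-- ===== CLAIM (what is proved, stated in full; the proofs are below) =====
def Claim_equal_empLine : Prop := ∀ (length : Int) (hashLength : Int), Dom_empLine length hashLength → Spec_empLine length hashLength (empLine length hashLength)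

-- ===== LEMMAS AND PROOFS =====

-- hashLength ≤ 0: A's loop never appends (both branch guards fail from state (0, 0))
theorem empALoop_nonpos (hl : Int) (h : hl ≤ 0) :
    ∀ n (line : List String), empALoop hl n 0 0 line = line := by
  intro n
  induction n with
  | zero => intro line; rfl
  | succ n ih =>
    intro line
    by_cases h0 : hl = 0
    · subst h0; simp [empALoop, ih]
    · simp [empALoop, not_lt.mpr h, ih, show (0 : Int) ≠ hl from by omega]

theorem emod_succ (p m : Int) (hm : 1 < m) (hp : 0 ≤ p) :
    (p + 1) % m = if p % m + 1 = m then 0 else p % m + 1 := by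
  have h1 : (1 : Int) % m = 1 := Int.emod_eq_of_lt (by omega) hm
  have h0 : 0 ≤ p % m := Int.emod_nonneg p (by omega)
  have hlt : p % m < m := Int.emod_lt_of_pos p (by omega)
  rw [Int.add_emod, h1]
  by_cases h : p % m + 1 = m
  · simp [h]
  · rw [Int.emod_eq_of_lt (by omega) (by omega)]; simp [h]

theorem empALoop_pos (hl : Int) (hpos : 0 < hl) :
    ∀ (n : Nat) (p : Int) (line : List String), 0 ≤ p →
      empALoop hl n (max (p % (2 * hl) - hl) 0) (min (p % (2 * hl)) hl) line
      = line ++ (List.range n).map (fun (i : Nat) => if (p + (i:Int)) % (2 * hl) < hl then " " else "#") := by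
  intro n
  induction n with
  | zero => intro p line _; simp [empALoop]
  | succ n ih =>
    intro p line hp
    have h0 : 0 ≤ p % (2 * hl) := Int.emod_nonneg p (by omega)
    have hlt : p % (2 * hl) < 2 * hl := Int.emod_lt_of_pos p (by omega)
    have hsucc := emod_succ p (2 * hl) (by omega) hp
    have ihs := ih (p + 1) (line ++ [if p % (2 * hl) < hl then " " else "#"]) (by omega)
    have hrange : (List.range (n + 1)).map (fun (i : Nat) => if (p + (i:Int)) % (2 * hl) < hl then " " else "#")
        = (if p % (2 * hl) < hl then " " else "#")
          :: (List.range n).map (fun (i : Nat) => if ((p + 1) + (i:Int)) % (2 * hl) < hl then " " else "#") := by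
      rw [List.range_succ_eq_map, List.map_cons, List.map_map]
      congr 1
      · norm_num
      · apply List.map_congr_left; intro i _
        have : p + (1 + (i : Int)) = (p + 1) + i := by ring
        simp [Function.comp, this]
        norm_num
        ring_nf
    by_cases hcase : p % (2 * hl) < hl
    · -- space branch
      have hb : min (p % (2 * hl)) hl < hl := by omega
      have hmax : max (p % (2 * hl)) 0 = p % (2 * hl) := by omega
      have hs1 : (p+1) % (2*hl) = p % (2*hl) + 1 := by rw [hsucc, if_neg (by omega)]
      have e1 : max ((p+1) % (2*hl) - hl) 0 = max (p % (2*hl) - hl) 0 := by rw [hs1]; omega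
      have e2 : min ((p+1) % (2*hl)) hl = min (p % (2*hl)) hl + 1 := by rw [hs1]; omega
      rw [show empALoop hl (n+1) (max (p % (2*hl) - hl) 0) (min (p % (2*hl)) hl) line
            = empALoop hl n (max ((p+1) % (2*hl) - hl) 0) (min ((p+1) % (2*hl)) hl) (line ++ [" "]) from by
        have hnr : ¬ (max (p % (2*hl) - hl) 0 = hl) := by omega
        simp only [empALoop, if_pos hb, if_neg hnr]
        rw [e1, e2]
        all_goals omega]
      rw [hrange, if_pos hcase]
      rw [show line ++ [" "] = line ++ [if p % (2*hl) < hl then " " else "#"] from by rw [if_pos hcase]]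
      rw [ihs]
      simp
      all_goals omega
    · -- hash branch
      have hb : ¬ (min (p % (2 * hl)) hl < hl) := by omega
      have hhc : max (p % (2 * hl) - hl) 0 < hl := by omega
      by_cases hlast : p % (2 * hl) + 1 = 2 * hl
      · have hs1 : (p + 1) % (2 * hl) = 0 := by rw [hsucc, if_pos hlast]
        have e1 : max ((p+1) % (2*hl) - hl) 0 = 0 := by rw [hs1]; omega
        have e2 : min ((p+1) % (2*hl)) hl = 0 := by rw [hs1]; omega
        rw [show empALoop hl (n+1) (max (p % (2*hl) - hl) 0) (min (p % (2*hl)) hl) line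
              = empALoop hl n (max ((p+1) % (2*hl) - hl) 0) (min ((p+1) % (2*hl)) hl) (line ++ ["#"]) from by
          have hr : max (p % (2*hl) - hl) 0 + 1 = hl := by omega
          simp only [empALoop, if_neg hb, if_pos hhc, hr, if_pos rfl, e1, e2, if_true, eq_self_iff_true]
          all_goals omega]
        rw [hrange, if_neg hcase]
        rw [show line ++ ["#"] = line ++ [if p % (2*hl) < hl then " " else "#"] from by rw [if_neg hcase]]
        rw [ihs]
        simp
        all_goals omega
      · have hs1 : (p + 1) % (2 * hl) = p % (2*hl) + 1 := by rw [hsucc, if_neg hlast]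
        have e1 : max ((p+1) % (2*hl) - hl) 0 = max (p % (2*hl) - hl) 0 + 1 := by rw [hs1]; omega
        have e2 : min ((p+1) % (2*hl)) hl = min (p % (2*hl)) hl := by rw [hs1]; omega
        rw [show empALoop hl (n+1) (max (p % (2*hl) - hl) 0) (min (p % (2*hl)) hl) line
              = empALoop hl n (max ((p+1) % (2*hl) - hl) 0) (min ((p+1) % (2*hl)) hl) (line ++ ["#"]) from by
          have hnr : ¬ (max (p % (2*hl) - hl) 0 + 1 = hl) := by omega
          simp only [empALoop, if_neg hb, if_pos hhc, if_neg hnr]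
          rw [e1, e2]
          all_goals omega]
        rw [hrange, if_neg hcase]
        rw [show line ++ ["#"] = line ++ [if p % (2*hl) < hl then " " else "#"] from by rw [if_neg hcase]]
        rw [ihs]
        simp
        all_goals omega

-- ===== VERDICT (by name: the statement is the Claim_ definition above) =====
theorem empLine_spec : Claim_equal_empLine := by
  intro length hashLength _
  unfold Spec_empLine empLine empLine_alt
  by_cases hl : hashLength ≤ 0
  · rw [if_pos hl, empALoop_nonpos hashLength hl]
  · rw [if_neg hl]
    have hpos : 0 < hashLength := by omega
    have h0 := empALoop_pos hashLength hpos length.toNat 0 [] le_rfl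
    simp only [show ((0:Int) % (2 * hashLength)) = 0 from Int.zero_emod _, max_eq_right (by omega : (0:Int) - hashLength ≤ 0), min_eq_left (by omega : (0:Int) ≤ hashLength)] at h0
    rw [h0, PySem.List.pyRange_one, List.map_map, List.nil_append,
      show (length - 0).toNat = length.toNat from by omega]
    apply List.map_congr_left
    intro i _
    simp only [Function.comp]
    rw [PySem.Int.mod_eq_emod_of_pos (by omega)]
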